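-- pv_equiv track=rewrite | github.com/sseungki98/Algorithm_Study | 성준/PG_[1차] 비밀지도.py | solution
-- ===== SOURCE A (Python) =====
-- def solution(n, arr1, arr2):
--     answer = []
--     for arr in zip(arr1,arr2):
--         ar=bin(arr[0]|arr[1])[2:].zfill(n)  #2진수 or bit연산자를 사용하고, 문자열 slice를 통해 0b를 제거 후 자릿수 0을 맞춰준다.
--         ar=ar.replace('1','#')  #1을 #으로 변환
--         ar=ar.replace('0',' ')  #0을 공백으로 변환
--         answer.append(ar)
--     return answer
-- ===== SOURCE B (Python) =====
-- def solution(n, arr1, arr2):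
--     answer = []
--     for a, b in zip(arr1, arr2):
--         x = a | b
--         width = max(n, x.bit_length(), 1)
--         row = [' '] * width
--         while x:
--             s = x.bit_length()
--             row[width - s] = '#'
--             x -= 1 << (s - 1)
--         answer.append(''.join(row))
--     return answer
-- ===== Notes on version B (the rewrite author's own statement) =====
-- stated objective: alternative
-- what changed: Instead of A's dense string pipeline (bin()+slice+zfill+two replaces), B preallocates a row of spaces of the final width and iterates only over the SET bits (repeatedly stripping the highest bit via bit_length), writing a '#' directly at each bit's position.
-- outside the precondition, e.g. on solution(2, [-1], [0]): A returns ['b#'], B raises IndexError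
import Mathlib
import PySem

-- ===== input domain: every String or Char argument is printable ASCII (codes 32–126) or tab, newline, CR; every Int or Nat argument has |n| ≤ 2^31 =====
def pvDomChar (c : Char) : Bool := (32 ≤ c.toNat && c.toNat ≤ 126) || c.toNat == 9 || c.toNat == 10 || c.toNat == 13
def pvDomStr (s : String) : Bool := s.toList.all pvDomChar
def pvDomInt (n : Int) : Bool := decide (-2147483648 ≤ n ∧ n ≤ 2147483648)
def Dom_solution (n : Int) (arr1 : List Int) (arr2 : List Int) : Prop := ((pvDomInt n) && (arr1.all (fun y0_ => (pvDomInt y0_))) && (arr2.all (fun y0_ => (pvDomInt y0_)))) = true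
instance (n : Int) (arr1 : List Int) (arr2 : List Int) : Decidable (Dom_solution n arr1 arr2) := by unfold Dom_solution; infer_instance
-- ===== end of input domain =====

-- B replaces A's dense string pipeline (bin()+slice+zfill+replace) by a preallocated row of
-- spaces into which a '#' is written for each SET bit only (highest bit stripped each round);
-- alternative decomposition, not claimed faster.

-- ===== PORT A =====
-- loop body of A: ar=bin(arr[0]|arr[1])[2:].zfill(n); ar=ar.replace('1','#'); ar=ar.replace('0',' ')
-- (strings ported as List Char; bin → PySem.Int.toBinChars0b, [2:] → slice, zfill/replace → PySem.Chars)
def aRow (n : Int) (arr : Int × Int) : String :=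
  let ar := PySem.List.slice (PySem.Int.toBinChars0b (PySem.Int.bor arr.1 arr.2)) (some 2) none
  let ar := PySem.Chars.zfill ar n
  let ar := PySem.Chars.replace ar ['1'] ['#']
  let ar := PySem.Chars.replace ar ['0'] [' ']
  String.mk ar

def solution (n : Int) (arr1 : List Int) (arr2 : List Int) : List String :=
  (arr1.zip arr2).foldl (fun answer arr => answer ++ [aRow n arr]) []

-- ===== PORT B =====
-- B's while loop: while x: s = x.bit_length(); row[width - s] = '#'; x -= 1 << (s - 1)
-- (x.bit_length() → Nat.size x.toNat; exact for the x ≥ 0 admitted by Pre_, where 'while x' = 'while 0 < x')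
def topBits (width : Nat) (x : Int) (row : List Char) : List Char :=
  if h : 0 < x then
    let s := Nat.size x.toNat
    topBits width (x - 2 ^ (s - 1)) (row.set (width - s) '#')
  else row
termination_by x.toNat
decreasing_by
  have hm : 0 < x.toNat := by omega
  have h1 : 2 ^ (Nat.size x.toNat - 1) ≤ x.toNat :=
    Nat.lt_size.mp (Nat.sub_lt (Nat.size_pos.mpr hm) one_pos)
  have h0 : 0 < 2 ^ (Nat.size x.toNat - 1) := Nat.two_pow_pos _
  have hc : ((2 : Int) ^ (Nat.size x.toNat - 1)) = ((2 ^ (Nat.size x.toNat - 1) : Nat) : Int) := by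
    push_cast; ring
  rw [hc]
  omega

-- loop body of B: width = max(n, x.bit_length(), 1); row = [' '] * width; place the set bits; join
def bRow (n : Int) (p : Int × Int) : String :=
  let x := PySem.Int.bor p.1 p.2
  let width := (max n (max ((Nat.size x.toNat : Int)) 1)).toNat
  String.mk (topBits width x (List.replicate width ' '))

def solution_alt (n : Int) (arr1 : List Int) (arr2 : List Int) : List String :=
  (arr1.zip arr2).foldl (fun answer p => answer ++ [bRow n p]) []

-- ===== PRECONDITION & SPEC =====
-- Pre_ restricts to nonnegative paired entries — the natural bitmap domain of this task; on a negative
-- entry A's '[2:]' slice mangles bin()'s '-0b' prefix into accidental strings such as 'b#' (and B's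
-- bit-placing loop raises IndexError there).
def Pre_solution (n : Int) (arr1 : List Int) (arr2 : List Int) : Prop :=
  ∀ p ∈ arr1.zip arr2, 0 ≤ p.1 ∧ 0 ≤ p.2
instance (n : Int) (arr1 : List Int) (arr2 : List Int) : Decidable (Pre_solution n arr1 arr2) := by unfold Pre_solution; infer_instance

def pvWitness_solution : Int × List Int × List Int := (5, [9, 20, 28, 18, 11], [30, 1, 21, 17, 28])

def Spec_solution (n : Int) (arr1 : List Int) (arr2 : List Int) (out : List String) : Prop := out = solution_alt n arr1 arr2
instance (n : Int) (arr1 : List Int) (arr2 : List Int) (out : List String) : Decidable (Spec_solution n arr1 arr2 out) := by unfold Spec_solution; infer_instance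

-- ===== CLAIM (what is proved, stated in full; the proofs are below) =====
def Claim_equal_solution : Prop := ∀ (n : Int) (arr1 : List Int) (arr2 : List Int), Dom_solution n arr1 arr2 → Pre_solution n arr1 arr2 → Spec_solution n arr1 arr2 (solution n arr1 arr2)

-- ===== LEMMAS AND PROOFS =====

-- binary digits of a positive Nat, MSB first (proof-side characterisation of Nat.toDigits 2)
def binCore (m : Nat) : List Char :=
  if h : m = 0 then [] else binCore (m / 2) ++ [if m % 2 = 1 then '1' else '0']
termination_by m
decreasing_by exact Nat.div_lt_self (Nat.pos_of_ne_zero h) one_lt_two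

lemma binCore_zero : binCore 0 = [] := by rw [binCore]; simp

lemma binCore_pos (m : Nat) (h : m ≠ 0) :
    binCore m = binCore (m / 2) ++ [if m % 2 = 1 then '1' else '0'] := by
  rw [binCore]; simp [h]

lemma binCore_ne_nil (m : Nat) (h : m ≠ 0) : binCore m ≠ [] := by
  rw [binCore_pos m h]; simp

lemma binCore_chars (m : Nat) : ∀ c ∈ binCore m, c = '0' ∨ c = '1' := by
  induction m using Nat.strong_induction_on with
  | _ m ih =>
    by_cases h : m = 0
    · subst h; rw [binCore_zero]; simp
    · rw [binCore_pos m h]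
      intro c hc
      rcases List.mem_append.mp hc with h1 | h1
      · exact ih (m / 2) (Nat.div_lt_self (Nat.pos_of_ne_zero h) one_lt_two) c h1
      · simp at h1; subst h1; split <;> simp

lemma toDigitsCore_eq (fuel : Nat) : ∀ m ds, 0 < m → m ≤ fuel →
    Nat.toDigitsCore 2 fuel m ds = binCore m ++ ds := by
  induction fuel with
  | zero => intro m ds hm hle; omega
  | succ fuel ih =>
    intro m ds hm hle
    rw [Nat.toDigitsCore]
    have hd : (m % 2).digitChar = if m % 2 = 1 then '1' else '0' := by
      rcases Nat.mod_two_eq_zero_or_one m with h | h <;> simp [h, Nat.digitChar]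
    by_cases h2 : m / 2 = 0
    · simp only [h2]
      rw [binCore_pos m (by omega), h2, binCore_zero, hd]; simp
    · simp only [if_neg h2]
      rw [ih (m / 2) _ (Nat.pos_of_ne_zero h2) (by omega)]
      rw [binCore_pos m (by omega), hd]; simp

lemma toDigits_eq (m : Nat) : Nat.toDigits 2 m = if m = 0 then ['0'] else binCore m := by
  by_cases h : m = 0
  · subst h; simp [Nat.toDigits, Nat.toDigitsCore, Nat.digitChar]
  · rw [Nat.toDigits, toDigitsCore_eq (m + 1) m [] (Nat.pos_of_ne_zero h) (by omega)]
    simp [h]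

-- single-character str.replace is a character map
lemma replace_go_single (a b : Char) : ∀ fuel l acc, l.length ≤ fuel →
    PySem.Chars.replace.go [a] [b] fuel l acc
      = acc.reverse ++ l.map (fun c => if c = a then b else c) := by
  intro fuel
  induction fuel with
  | zero =>
    intro l acc hle
    have : l = [] := by cases l <;> simp_all
    subst this; simp [PySem.Chars.replace.go]
  | succ fuel ih =>
    intro l acc hle
    cases l with
    | nil =>
      rw [show PySem.Chars.replace.go [a] [b] (fuel + 1) [] acc = acc.reverse from rfl]
      simp
    | cons c t =>
      rw [PySem.Chars.replace.go]
      have hp : [a].isPrefixOf (c :: t) = (a == c) := by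
        simp [List.isPrefixOf]
      rw [hp]
      by_cases hac : a = c
      · rw [if_pos (by simp [hac])]
        rw [ih (List.drop [a].length (c :: t)) ([b].reverse ++ acc) (by simpa using hle)]
        simp [hac.symm]
      · rw [if_neg (by simp [hac])]
        rw [ih t (c :: acc) (by simpa using hle)]
        simp [Ne.symm hac]

lemma replace_single (l : List Char) (a b : Char) :
    PySem.Chars.replace l [a] [b] = l.map (fun c => if c = a then b else c) := by
  rw [PySem.Chars.replace]
  rw [if_neg (by simp : ¬ (([a] : List Char).isEmpty = true))]
  rw [replace_go_single a b l.length l [] le_rfl]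
  simp

-- the two character replacements compose to '1' → '#', '0' → ' ' on binary digits
lemma map_digits (l : List Char) (hch : ∀ c ∈ l, c = '0' ∨ c = '1') :
    List.map (fun c => if c = '0' then ' ' else c) (List.map (fun c => if c = '1' then '#' else c) l)
      = List.map (fun c => if c = '1' then '#' else ' ') l := by
  rw [List.map_map]
  exact List.map_congr_left (fun c hc => by rcases hch c hc with h | h <;> simp [h])

-- zfill on a sign-free digit string is plain left padding
lemma zfill_digits (l : List Char) (hne : l ≠ []) (hch : ∀ c ∈ l, c = '0' ∨ c = '1') (n : Int) :
    PySem.Chars.zfill l n = if n ≤ (l.length : Int) then l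
      else List.replicate (n.toNat - l.length) '0' ++ l := by
  simp only [PySem.Chars.zfill]
  cases l with
  | nil => simp at hne
  | cons c rest =>
    have hc : ¬ (c = '+' ∨ c = '-') := by
      rcases hch c (by simp) with h | h <;> simp [h]
    split
    · rfl
    · simp [hc]

-- Nat.size halves: the bit length of m > 0 is one more than that of m / 2
lemma size_half (m : Nat) (hm : 0 < m) : Nat.size m = Nat.size (m / 2) + 1 := by
  by_cases hq : m / 2 = 0
  · have hm1 : m = 1 := by omega
    subst hm1; decide
  · have hqpos : 0 < m / 2 := Nat.pos_of_ne_zero hq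
    have ht1 : 0 < Nat.size (m / 2) := Nat.size_pos.mpr hqpos
    have hub : m / 2 < 2 ^ Nat.size (m / 2) := Nat.lt_size_self _
    have hlb : 2 ^ (Nat.size (m / 2) - 1) ≤ m / 2 :=
      Nat.lt_size.mp (Nat.sub_lt ht1 one_pos)
    apply le_antisymm
    · apply Nat.size_le.mpr
      have h2 : 2 ^ (Nat.size (m / 2) + 1) = 2 * 2 ^ Nat.size (m / 2) := by
        rw [pow_succ]; ring
      omega
    · have h2 : 2 ^ Nat.size (m / 2) = 2 * 2 ^ (Nat.size (m / 2) - 1) := by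
        conv_lhs => rw [show Nat.size (m / 2) = (Nat.size (m / 2) - 1) + 1 by omega]
        rw [pow_succ]; ring
      have : Nat.size (m / 2) < Nat.size m := Nat.lt_size.mpr (by omega)
      omega

lemma binCore_length (m : Nat) : (binCore m).length = Nat.size m := by
  induction m using Nat.strong_induction_on with
  | _ m ih =>
    by_cases h : m = 0
    · subst h; rw [binCore_zero, Nat.size_zero]; rfl
    · rw [binCore_pos m h, size_half m (Nat.pos_of_ne_zero h)]
      simp [ih (m / 2) (Nat.div_lt_self (Nat.pos_of_ne_zero h) one_lt_two)]

-- MSB-first decomposition: the digits of m > 0 are '1', then the digits of m - 2^(size-1) zero-padded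
lemma binCore_top (m : Nat) : 0 < m →
    binCore m = '1' :: (List.replicate (Nat.size m - 1 - Nat.size (m - 2 ^ (Nat.size m - 1))) '0'
      ++ binCore (m - 2 ^ (Nat.size m - 1))) := by
  induction m using Nat.strong_induction_on with
  | _ m ih =>
    intro hm
    by_cases hm1 : m = 1
    · subst hm1
      rw [binCore_pos 1 one_ne_zero]
      norm_num [binCore_zero, Nat.size_zero]
    · have hm2 : 2 ≤ m := by omega
      have hq : 0 < m / 2 := by omega
      have hs2 : 2 ≤ Nat.size m := by
        have := Nat.lt_size.mpr (show 2 ^ 1 ≤ m by omega)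
        omega
      have hsq : Nat.size (m / 2) = Nat.size m - 1 := by
        have := size_half m hm; omega
      have hpe : 2 ^ (Nat.size m - 1) = 2 * 2 ^ (Nat.size m - 2) := by
        conv_lhs => rw [show Nat.size m - 1 = (Nat.size m - 2) + 1 by omega]
        rw [pow_succ]; ring
      have hple : 2 ^ (Nat.size m - 1) ≤ m :=
        Nat.lt_size.mp (by omega)
      have hub : m < 2 ^ Nat.size m := Nat.lt_size_self m
      have h2s : 2 ^ Nat.size m = 2 * 2 ^ (Nat.size m - 1) := by
        conv_lhs => rw [show Nat.size m = (Nat.size m - 1) + 1 by omega]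
        rw [pow_succ]; ring
      -- IH on the half
      have ihq := ih (m / 2) (Nat.div_lt_self hm one_lt_two) hq
      rw [hsq] at ihq
      have hqq : m / 2 - 2 ^ (Nat.size m - 1 - 1) = m / 2 - 2 ^ (Nat.size m - 2) := by
        rw [show Nat.size m - 1 - 1 = Nat.size m - 2 from by omega]
      rw [hqq] at ihq
      have hdiv : (m - 2 ^ (Nat.size m - 1)) / 2 = m / 2 - 2 ^ (Nat.size m - 2) := by omega
      have hmod : (m - 2 ^ (Nat.size m - 1)) % 2 = m % 2 := by omega
      rw [binCore_pos m (by omega), ihq]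
      by_cases hz : m - 2 ^ (Nat.size m - 1) = 0
      · have hq0 : m / 2 - 2 ^ (Nat.size m - 2) = 0 := by omega
        have hmod0 : m % 2 = 0 := by omega
        rw [hz, hq0, binCore_zero, Nat.size_zero, hmod0]
        have : Nat.size m - 1 - 0 = (Nat.size m - 2) + 1 := by omega
        rw [this, List.replicate_succ']
        simp
        omega
      · have hz2 : (m - 2 ^ (Nat.size m - 1)) ≠ 0 := hz
        rw [binCore_pos _ hz2, hdiv, hmod]
        have hszrel : Nat.size (m - 2 ^ (Nat.size m - 1))
            = Nat.size (m / 2 - 2 ^ (Nat.size m - 2)) + 1 := by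
          have := size_half (m - 2 ^ (Nat.size m - 1)) (Nat.pos_of_ne_zero hz)
          rw [hdiv] at this; exact this
        rw [hszrel]
        have : Nat.size m - 1 - (Nat.size (m / 2 - 2 ^ (Nat.size m - 2)) + 1)
            = Nat.size m - 1 - 1 - Nat.size (m / 2 - 2 ^ (Nat.size m - 2)) := by omega
        rw [this]
        simp

-- setting position k - s of a row of k spaces
lemma set_replicate (k s : Nat) (h1 : 1 ≤ s) (h2 : s ≤ k) :
    (List.replicate k (' ' : Char)).set (k - s) '#'
      = List.replicate (k - s) ' ' ++ '#' :: List.replicate (s - 1) ' ' := by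
  obtain ⟨t, rfl⟩ : ∃ t, k = t + ((s - 1) + 1) := ⟨k - s, by omega⟩
  have ht : t + ((s - 1) + 1) - s = t := by omega
  rw [ht, List.replicate_add, List.replicate_succ, List.set_append,
    if_neg (by simp), List.length_replicate, Nat.sub_self, List.set_cons_zero]

-- B's loop fills a preallocated space row with one '#' per set bit, top bit first
lemma place_spec (m : Nat) : ∀ (k : Nat) (pre : List Char), Nat.size m ≤ k →
    topBits (pre.length + k) (m : Int) (pre ++ List.replicate k ' ')
      = pre ++ (List.replicate (k - Nat.size m) ' '
          ++ (binCore m).map (fun c => if c = '1' then '#' else ' ')) := by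
  induction m using Nat.strong_induction_on with
  | _ m ih =>
    intro k pre hk
    by_cases hm : m = 0
    · subst hm
      rw [topBits, dif_neg (by norm_num)]
      simp [binCore_zero]
    · have hmpos : 0 < m := Nat.pos_of_ne_zero hm
      have hs1 : 1 ≤ Nat.size m := Nat.size_pos.mpr hmpos
      have hple : 2 ^ (Nat.size m - 1) ≤ m := Nat.lt_size.mp (by omega)
      have hub : m < 2 ^ Nat.size m := Nat.lt_size_self m
      have h2s : 2 ^ Nat.size m = 2 * 2 ^ (Nat.size m - 1) := by
        conv_lhs => rw [show Nat.size m = (Nat.size m - 1) + 1 by omega]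
        rw [pow_succ]; ring
      have hm'lt : m - 2 ^ (Nat.size m - 1) < 2 ^ (Nat.size m - 1) := by omega
      have hszm' : Nat.size (m - 2 ^ (Nat.size m - 1)) ≤ Nat.size m - 1 := Nat.size_le.mpr hm'lt
      rw [topBits, dif_pos (by exact_mod_cast hmpos)]
      simp only [Int.toNat_natCast]
      have hcast : ((m : Int) - 2 ^ (Nat.size m - 1)) = ((m - 2 ^ (Nat.size m - 1) : Nat) : Int) := by
        rw [Nat.cast_sub hple]; push_cast; ring
      rw [hcast]
      have hidx : pre.length + k - Nat.size m = pre.length + (k - Nat.size m) := by omega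
      rw [hidx, List.set_append, if_neg (by omega)]
      have hidx2 : pre.length + (k - Nat.size m) - pre.length = k - Nat.size m := by omega
      rw [hidx2]
      rw [set_replicate k (Nat.size m) hs1 hk]
      have hrow : pre ++ (List.replicate (k - Nat.size m) ' ' ++ '#' :: List.replicate (Nat.size m - 1) ' ')
          = (pre ++ List.replicate (k - Nat.size m) ' ' ++ ['#']) ++ List.replicate (Nat.size m - 1) ' ' := by
        simp
      have hw : pre.length + k
          = (pre ++ List.replicate (k - Nat.size m) ' ' ++ ['#']).length + (Nat.size m - 1) := by
        simp; omega
      rw [hrow, hw,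
        ih (m - 2 ^ (Nat.size m - 1)) (by omega) (Nat.size m - 1)
          (pre ++ List.replicate (k - Nat.size m) ' ' ++ ['#']) hszm']
      rw [binCore_top m hmpos]
      simp

-- a full-width space row filled by B's loop equals the padded rendered digit string
lemma fullRow (m W : Nat) (hW : max (Nat.size m) 1 ≤ W) :
    topBits W (m : Int) (List.replicate W ' ')
      = List.replicate (W - (if m = 0 then ['0'] else binCore m).length) ' '
          ++ (if m = 0 then ['0'] else binCore m).map (fun c => if c = '1' then '#' else ' ') := by
  by_cases hm : m = 0
  · subst hm
    have hW1 : 1 ≤ W := by omega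
    rw [topBits, dif_neg (by norm_num)]
    norm_num
    conv_lhs => rw [show W = (W - 1) + 1 by omega]
    rw [List.replicate_succ']
    simp
  · have hsz : Nat.size m ≤ W := le_trans (le_max_left _ _) hW
    have h := place_spec m W [] hsz
    simp only [List.length_nil, List.nil_append, Nat.zero_add] at h
    rw [if_neg hm, h, binCore_length]

-- the two per-row computations agree on nonnegative entries
lemma row_eq (nn : Int) (p : Int × Int) (h1 : 0 ≤ p.1) (h2 : 0 ≤ p.2) :
    aRow nn p = bRow nn p := by
  simp only [aRow, bRow, PySem.Int.bor_of_nonneg h1 h2]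
  generalize (p.1.toNat ||| p.2.toNat) = m
  have hA1 : PySem.List.slice (PySem.Int.toBinChars0b (m : Int)) (some 2) none
      = Nat.toDigits 2 m := by
    rw [PySem.Int.toBinChars0b]
    rw [if_neg (by simp : ¬ ((m : Int) < 0))]
    rw [show ((2:Int)) = ((2:Nat):Int) by norm_num]
    rw [PySem.List.slice_from_natCast]
    simp
  rw [hA1, toDigits_eq, replace_single, replace_single]
  set l : List Char := if m = 0 then ['0'] else binCore m with hl
  have hch : ∀ c ∈ l, c = '0' ∨ c = '1' := by
    rw [hl]; split
    · simp
    · exact binCore_chars m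
  have hne : l ≠ [] := by
    rw [hl]; split
    · simp
    · exact binCore_ne_nil m (by assumption)
  have hLl : l.length = max (Nat.size m) 1 := by
    rw [hl]; by_cases hm : m = 0
    · subst hm; simp
    · rw [if_neg hm, binCore_length]
      have := Nat.size_pos.mpr (Nat.pos_of_ne_zero hm); omega
  simp only [Int.toNat_natCast]
  have hW : ((max nn (max ((Nat.size m : Int)) 1)).toNat) = max nn.toNat l.length := by
    rw [hLl]; omega
  rw [hW, fullRow m (max nn.toNat l.length) (by omega), ← hl]
  rw [zfill_digits l hne hch nn]
  by_cases hn : nn ≤ (l.length : Int)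
  · rw [if_pos hn, map_digits l hch]
    have hWl : max nn.toNat l.length = l.length := by omega
    rw [hWl]
    simp
  · rw [if_neg hn, List.map_append, List.map_append, map_digits l hch]
    have hWl : max nn.toNat l.length = nn.toNat := by omega
    rw [hWl]
    simp only [List.map_replicate]
    simp

-- the folds append one rendered row per pair
lemma foldl_append_row (f : Int × Int → String) (l : List (Int × Int)) (init : List String) :
    l.foldl (fun acc p => acc ++ [f p]) init = init ++ l.map f := by
  induction l generalizing init with
  | nil => simp
  | cons x xs ih => simp [ih]

-- ===== VERDICT (by name: the statement is the Claim_ definition above) =====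
theorem solution_spec : Claim_equal_solution := by
  intro n arr1 arr2 _ hpre
  unfold Spec_solution solution solution_alt
  rw [foldl_append_row (aRow n), foldl_append_row (bRow n)]
  simp only [List.nil_append]
  exact List.map_congr_left (fun p hp => row_eq n p (hpre p hp).1 (hpre p hp).2)
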